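-- pv_equiv track=rewrite | github.com/akshay-greenlang/Code-V1_GreenLang | greenlang/agents/mrv/purchased_goods_services/average_data_calculator.py | _resolve_from_description
-- ===== SOURCE A (Python) =====
-- from typing import Any, Dict, List, Optional, Tuple
--
-- DESCRIPTION_KEYWORD_MAP: Dict[str, str] = {
--     "steel": "steel_world_avg",
--     "stainless steel": "steel_primary_bof",
--     "aluminium": "aluminum_primary_global",
--     "aluminum": "aluminum_primary_global",
--     "copper": "copper_primary",
--     "lead": "lead",
--     "zinc": "zinc",
--     "lithium": "lithium_carbonate",
--     "hdpe": "hdpe",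
--     "ldpe": "ldpe",
--     "polypropylene": "pp_polypropylene",
--     "pp ": "pp_polypropylene",
--     "pet ": "pet",
--     "polyethylene terephthalate": "pet",
--     "pvc": "pvc",
--     "polystyrene": "ps_polystyrene",
--     "abs ": "abs",
--     "nylon": "nylon_6",
--     "cement": "cement_portland_global",
--     "concrete": "concrete_readymix_30mpa",
--     "glass": "glass_general",
--     "brick": "bricks_general",
--     "timber": "timber_softwood_sawn",
--     "lumber": "timber_softwood_sawn",
--     "plywood": "timber_softwood_sawn",
--     "softwood": "timber_softwood_sawn",
--     "hardwood": "timber_hardwood_sawn",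
--     "glulam": "timber_glulam",
--     "cardboard": "corrugated_cardboard",
--     "corrugated": "corrugated_cardboard",
--     "kraft": "kraft_paper",
--     "paper": "kraft_paper",
--     "recycled paper": "recycled_paper",
--     "cotton": "cotton_conventional",
--     "organic cotton": "cotton_organic",
--     "polyester": "polyester_fiber",
--     "wool": "wool",
--     "ammonia": "ammonia",
--     "ethylene": "ethylene",
--     "propylene": "propylene",
--     "methanol": "methanol",
--     "rubber": "natural_rubber",
--     "natural rubber": "natural_rubber",
--     "synthetic rubber": "synthetic_rubber_sbr",
--     "silicon": "silicon_wafer_solar",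
--     "pcb": "pcb_printed_circuit",
--     "circuit board": "pcb_printed_circuit",
-- }
--
-- def _resolve_from_description(
--     description: str,
-- ) -> Optional[str]:
--     """Resolve material key from item description keywords.
--
--     Performs case-insensitive longest-match against
--     ``DESCRIPTION_KEYWORD_MAP``.  Longer keywords are checked
--     first to ensure specificity (e.g. "recycled paper" beats
--     "paper").
--
--     Args:
--         description: Item description text.
--
--     Returns:
--         Material key if matched, else None.
--     """
--     if not description:
--         return None
--
--     desc_lower = description.lower()
--     # Sort by keyword length descending for longest match first
--     sorted_keywords = sorted(
--         DESCRIPTION_KEYWORD_MAP.keys(),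
--         key=len,
--         reverse=True,
--     )
--     for keyword in sorted_keywords:
--         if keyword in desc_lower:
--             return DESCRIPTION_KEYWORD_MAP[keyword]
--     return None
-- ===== SOURCE B (Python) =====
-- """Keyword table kept as a compact text table ("keyword<TAB>material_key", one entry
-- per line), parsed once at import; resolution is a single running-longest-match pass
-- over the parsed pairs, no sorting."""
--
-- _KEYWORD_TABLE = [
--     'steel\tsteel_world_avg',
--     'stainless steel\tsteel_primary_bof',
--     'aluminium\taluminum_primary_global',
--     'aluminum\taluminum_primary_global',
--     'copper\tcopper_primary',
--     'lead\tlead',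
--     'zinc\tzinc',
--     'lithium\tlithium_carbonate',
--     'hdpe\thdpe',
--     'ldpe\tldpe',
--     'polypropylene\tpp_polypropylene',
--     'pp \tpp_polypropylene',
--     'pet \tpet',
--     'polyethylene terephthalate\tpet',
--     'pvc\tpvc',
--     'polystyrene\tps_polystyrene',
--     'abs \tabs',
--     'nylon\tnylon_6',
--     'cement\tcement_portland_global',
--     'concrete\tconcrete_readymix_30mpa',
--     'glass\tglass_general',
--     'brick\tbricks_general',
--     'timber\ttimber_softwood_sawn',
--     'lumber\ttimber_softwood_sawn',
--     'plywood\ttimber_softwood_sawn',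
--     'softwood\ttimber_softwood_sawn',
--     'hardwood\ttimber_hardwood_sawn',
--     'glulam\ttimber_glulam',
--     'cardboard\tcorrugated_cardboard',
--     'corrugated\tcorrugated_cardboard',
--     'kraft\tkraft_paper',
--     'paper\tkraft_paper',
--     'recycled paper\trecycled_paper',
--     'cotton\tcotton_conventional',
--     'organic cotton\tcotton_organic',
--     'polyester\tpolyester_fiber',
--     'wool\twool',
--     'ammonia\tammonia',
--     'ethylene\tethylene',
--     'propylene\tpropylene',
--     'methanol\tmethanol',
--     'rubber\tnatural_rubber',
--     'natural rubber\tnatural_rubber',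
--     'synthetic rubber\tsynthetic_rubber_sbr',
--     'silicon\tsilicon_wafer_solar',
--     'pcb\tpcb_printed_circuit',
--     'circuit board\tpcb_printed_circuit',
-- ]
--
--
-- def _parse_table(rows):
--     return [tuple(row.split("\t")) for row in rows]
--
--
-- _KEYWORD_PAIRS = _parse_table(_KEYWORD_TABLE)
--
--
-- def _resolve_from_description(description):
--     desc_lower = description.lower()
--     best_len = 0
--     best = None
--     for keyword, material_key in _KEYWORD_PAIRS:
--         if len(keyword) > best_len and keyword in desc_lower:
--             best_len = len(keyword)
--             best = material_key
--     return best
-- ===== Notes on version B (the rewrite author's own statement) =====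
-- stated objective: alternative
-- what changed: B stores the keyword table as one tab-separated text block parsed once at import and resolves with a single running-longest-match pass (strict > keeps the earliest-inserted keyword on length ties), instead of A's per-call length-descending sort of the dict keys followed by a first-match scan.
import Mathlib
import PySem

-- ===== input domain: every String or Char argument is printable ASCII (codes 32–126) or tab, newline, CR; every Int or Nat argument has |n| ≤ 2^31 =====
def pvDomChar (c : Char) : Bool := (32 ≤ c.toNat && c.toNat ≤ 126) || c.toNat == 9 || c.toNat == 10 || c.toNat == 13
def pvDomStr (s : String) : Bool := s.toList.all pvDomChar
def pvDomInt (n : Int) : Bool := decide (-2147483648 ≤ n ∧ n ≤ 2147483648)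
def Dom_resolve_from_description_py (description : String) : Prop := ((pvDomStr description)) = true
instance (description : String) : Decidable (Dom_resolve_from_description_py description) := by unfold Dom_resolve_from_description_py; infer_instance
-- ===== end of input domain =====

-- B keeps the keyword table as a list of tab-separated rows parsed once and resolves by a
-- single running-longest-match pass over it, replacing A's per-call sort-then-first-match
-- over the dict (objective: alternative).

-- ===== PORT A =====
-- the module constant DESCRIPTION_KEYWORD_MAP, as its items list
def pvKMList : List (String × String) :=
  [("steel", "steel_world_avg"), ("stainless steel", "steel_primary_bof"),
   ("aluminium", "aluminum_primary_global"), ("aluminum", "aluminum_primary_global"),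
   ("copper", "copper_primary"), ("lead", "lead"), ("zinc", "zinc"),
   ("lithium", "lithium_carbonate"), ("hdpe", "hdpe"), ("ldpe", "ldpe"),
   ("polypropylene", "pp_polypropylene"), ("pp ", "pp_polypropylene"),
   ("pet ", "pet"), ("polyethylene terephthalate", "pet"), ("pvc", "pvc"),
   ("polystyrene", "ps_polystyrene"), ("abs ", "abs"), ("nylon", "nylon_6"),
   ("cement", "cement_portland_global"), ("concrete", "concrete_readymix_30mpa"),
   ("glass", "glass_general"), ("brick", "bricks_general"),
   ("timber", "timber_softwood_sawn"), ("lumber", "timber_softwood_sawn"),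
   ("plywood", "timber_softwood_sawn"), ("softwood", "timber_softwood_sawn"),
   ("hardwood", "timber_hardwood_sawn"), ("glulam", "timber_glulam"),
   ("cardboard", "corrugated_cardboard"), ("corrugated", "corrugated_cardboard"),
   ("kraft", "kraft_paper"), ("paper", "kraft_paper"),
   ("recycled paper", "recycled_paper"), ("cotton", "cotton_conventional"),
   ("organic cotton", "cotton_organic"), ("polyester", "polyester_fiber"),
   ("wool", "wool"), ("ammonia", "ammonia"), ("ethylene", "ethylene"),
   ("propylene", "propylene"), ("methanol", "methanol"),
   ("rubber", "natural_rubber"), ("natural rubber", "natural_rubber"),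
   ("synthetic rubber", "synthetic_rubber_sbr"), ("silicon", "silicon_wafer_solar"),
   ("pcb", "pcb_printed_circuit"), ("circuit board", "pcb_printed_circuit")]

def pvKeywordMap : PySem.Dict String String := PySem.Dict.ofList pvKMList

-- the `for keyword in sorted_keywords: if keyword in desc_lower: return MAP[keyword]` loop
-- (`MAP[keyword]` would be a KeyError if the key were absent; here every keyword is a key of the map)
def pvFirstMatch (desc_lower : String) : List String → Option String
  | [] => none
  | keyword :: rest =>
      if PySem.Str.isIn keyword desc_lower then PySem.Dict.get? pvKeywordMap keyword
      else pvFirstMatch desc_lower rest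

def resolve_from_description_py (description : String) : Option String :=
  if description = "" then none
  else
    let desc_lower := PySem.Str.lower description
    let sorted_keywords := PySem.List.sorted (PySem.Dict.keys pvKeywordMap) (fun k => PySem.Str.len k) true
    pvFirstMatch desc_lower sorted_keywords

-- ===== PORT B =====
-- the module constant _KEYWORD_TABLE: one entry per line, "keyword<TAB>material_key"
def pvTableLines : List String :=
  ["steel\tsteel_world_avg",
   "stainless steel\tsteel_primary_bof",
   "aluminium\taluminum_primary_global",
   "aluminum\taluminum_primary_global",
   "copper\tcopper_primary",
   "lead\tlead",
   "zinc\tzinc",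
   "lithium\tlithium_carbonate",
   "hdpe\thdpe",
   "ldpe\tldpe",
   "polypropylene\tpp_polypropylene",
   "pp \tpp_polypropylene",
   "pet \tpet",
   "polyethylene terephthalate\tpet",
   "pvc\tpvc",
   "polystyrene\tps_polystyrene",
   "abs \tabs",
   "nylon\tnylon_6",
   "cement\tcement_portland_global",
   "concrete\tconcrete_readymix_30mpa",
   "glass\tglass_general",
   "brick\tbricks_general",
   "timber\ttimber_softwood_sawn",
   "lumber\ttimber_softwood_sawn",
   "plywood\ttimber_softwood_sawn",
   "softwood\ttimber_softwood_sawn",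
   "hardwood\ttimber_hardwood_sawn",
   "glulam\ttimber_glulam",
   "cardboard\tcorrugated_cardboard",
   "corrugated\tcorrugated_cardboard",
   "kraft\tkraft_paper",
   "paper\tkraft_paper",
   "recycled paper\trecycled_paper",
   "cotton\tcotton_conventional",
   "organic cotton\tcotton_organic",
   "polyester\tpolyester_fiber",
   "wool\twool",
   "ammonia\tammonia",
   "ethylene\tethylene",
   "propylene\tpropylene",
   "methanol\tmethanol",
   "rubber\tnatural_rubber",
   "natural rubber\tnatural_rubber",
   "synthetic rubber\tsynthetic_rubber_sbr",
   "silicon\tsilicon_wafer_solar",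
   "pcb\tpcb_printed_circuit",
   "circuit board\tpcb_printed_circuit"]

-- `tuple(row.split("\t"))`; the fallback branch is unreachable for the concrete table
-- (the separator is nonempty and every row holds exactly one tab)
def pvParseLine (line : String) : String × String :=
  match PySem.Str.split? line "\t" with
  | some [k, v] => (k, v)
  | _ => ("", "")

-- `_parse_table` / `_KEYWORD_PAIRS`
def pvKeywordPairs : List (String × String) :=
  pvTableLines.map pvParseLine

-- one iteration of B's loop: state = (best_len, best)
def pvStepAlt (desc_lower : String) (st : Int × Option String) (kv : String × String) :
    Int × Option String :=
  if decide (st.1 < PySem.Str.len kv.1) && PySem.Str.isIn kv.1 desc_lower then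
    (PySem.Str.len kv.1, some kv.2)
  else st

def resolve_from_description_py_alt (description : String) : Option String :=
  let desc_lower := PySem.Str.lower description
  (pvKeywordPairs.foldl (pvStepAlt desc_lower) (0, none)).2

-- ===== PRECONDITION & SPEC =====
def Spec_resolve_from_description_py (description : String) (out : Option String) : Prop := out = resolve_from_description_py_alt description
instance (description : String) (out : Option String) : Decidable (Spec_resolve_from_description_py description out) := by unfold Spec_resolve_from_description_py; infer_instance

-- ===== CLAIM (what is proved, stated in full; the proofs are below) =====
def Claim_equal_resolve_from_description_py : Prop := ∀ (description : String), Dom_resolve_from_description_py description → Spec_resolve_from_description_py description (resolve_from_description_py description)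

-- ===== LEMMAS AND PROOFS =====

-- B's parsed table is exactly the items list of A's keyword map
set_option maxRecDepth 100000 in
set_option maxHeartbeats 2000000 in
lemma pvPairs_eq : pvKeywordPairs = pvKMList := by decide

-- proof-side single-pass "best so far" carrying the whole matching pair
def pvStepB (desc_lower : String) (best : Option (String × String)) (kv : String × String) :
    Option (String × String) :=
  if PySem.Str.isIn kv.1 desc_lower &&
      (match best with | none => true | some b => decide (PySem.Str.len b.1 < PySem.Str.len kv.1)) then
    some kv
  else best

-- B's state (best_len, best) is the image of that pair-carrying state
def pvG : Option (String × String) → Int × Option String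
  | none => (0, none)
  | some kv => (PySem.Str.len kv.1, some kv.2)

lemma pvStepAlt_g (low : String) (acc : Option (String × String)) (kv : String × String)
    (h : 0 < PySem.Str.len kv.1) :
    pvStepAlt low (pvG acc) kv = pvG (pvStepB low acc kv) := by
  rcases acc with _ | b <;>
    cases hp : PySem.Str.isIn kv.1 low <;>
      simp only [pvStepAlt, pvStepB, pvG, hp, Bool.and_true, Bool.and_false, Bool.true_and,
        Bool.false_and, if_false, Bool.false_eq_true] <;>
      split_ifs <;> simp_all
  all_goals omega

lemma pvFoldl_alt_g (low : String) :
    ∀ (L : List (String × String)), (∀ kv ∈ L, 0 < PySem.Str.len kv.1) →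
      ∀ acc, L.foldl (pvStepAlt low) (pvG acc) = pvG (L.foldl (pvStepB low) acc) := by
  intro L
  induction L with
  | nil => intro _ acc; rfl
  | cons x L ih =>
      intro h acc
      simp only [List.foldl_cons]
      rw [pvStepAlt_g low acc x (h x List.mem_cons_self)]
      exact ih (fun kv hkv => h kv (List.mem_cons_of_mem x hkv)) _

set_option maxRecDepth 40000 in
lemma pvKM_pos : ∀ kv ∈ pvKMList, 0 < PySem.Str.len kv.1 := by decide

lemma pvG_snd (o : Option (String × String)) : (pvG o).2 = o.map Prod.snd := by
  cases o <;> rfl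

-- proof-side model of Python's stable length-descending sort of the keyword pairs
def pvInsDesc (x : String × String) : List (String × String) → List (String × String)
  | [] => [x]
  | y :: ys => if PySem.Str.len x.1 < PySem.Str.len y.1 then y :: pvInsDesc x ys else x :: y :: ys

def pvSortDesc : List (String × String) → List (String × String)
  | [] => []
  | x :: xs => pvInsDesc x (pvSortDesc xs)

-- "merge a later best-candidate into an earlier accumulator" (earlier wins ties)
def pvCombine (acc r : Option (String × String)) : Option (String × String) :=
  match r with
  | none => acc
  | some x =>
      match acc with
      | none => some x
      | some b => if PySem.Str.len b.1 < PySem.Str.len x.1 then some x else some b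

lemma pvStepB_combine (low : String) (acc r : Option (String × String)) (x : String × String) :
    pvCombine (pvStepB low acc x) r = pvCombine acc (pvCombine (pvStepB low none x) r) := by
  rcases acc with _ | b <;> rcases r with _ | t <;>
    cases hp : PySem.Str.isIn x.1 low <;>
      simp only [pvStepB, pvCombine, hp, Bool.true_and, Bool.false_and, if_false, if_true,
        decide_eq_true_eq, Bool.false_eq_true] <;>
      split_ifs <;> (dsimp only) <;> (try split_ifs) <;> first | rfl | omega

lemma pvFoldl_stepB (low : String) :
    ∀ (M : List (String × String)) (acc : Option (String × String)),
      M.foldl (pvStepB low) acc = pvCombine acc (M.foldl (pvStepB low) none) := by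
  intro M
  induction M with
  | nil => intro acc; rfl
  | cons x M ih =>
      intro acc
      simp only [List.foldl_cons]
      rw [ih (pvStepB low acc x), ih (pvStepB low none x), pvStepB_combine]

lemma pvMem_insDesc (x y : String × String) (L : List (String × String)) :
    y ∈ pvInsDesc x L ↔ y = x ∨ y ∈ L := by
  induction L with
  | nil => simp [pvInsDesc]
  | cons z L ih =>
      simp only [pvInsDesc]
      split_ifs
      · simp [ih]; tauto
      · simp

lemma pvInsDesc_pairwise (x : String × String) (L : List (String × String))
    (h : L.Pairwise (fun a b => PySem.Str.len b.1 ≤ PySem.Str.len a.1)) :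
    (pvInsDesc x L).Pairwise (fun a b => PySem.Str.len b.1 ≤ PySem.Str.len a.1) := by
  induction L with
  | nil => simp [pvInsDesc]
  | cons y L ih =>
      rcases List.pairwise_cons.mp h with ⟨hy, hL⟩
      simp only [pvInsDesc]
      split_ifs with hlt
      · refine List.pairwise_cons.mpr ⟨?_, ih hL⟩
        intro z hz
        rcases (pvMem_insDesc x z L).mp hz with rfl | hzL
        · omega
        · exact hy z hzL
      · refine List.pairwise_cons.mpr ⟨?_, h⟩
        intro z hz
        rcases List.mem_cons.mp hz with rfl | hzL
        · omega
        · have := hy z hzL; omega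

lemma pvSortDesc_pairwise (M : List (String × String)) :
    (pvSortDesc M).Pairwise (fun a b => PySem.Str.len b.1 ≤ PySem.Str.len a.1) := by
  induction M with
  | nil => exact List.Pairwise.nil
  | cons x M ih => exact pvInsDesc_pairwise x _ ih

lemma pvCombine_none (r : Option (String × String)) : pvCombine none r = r := by
  cases r <;> rfl

lemma pvFind?_insDesc (low : String) (x : String × String) (L : List (String × String))
    (h : L.Pairwise (fun a b => PySem.Str.len b.1 ≤ PySem.Str.len a.1)) :
    (pvInsDesc x L).find? (fun kv => PySem.Str.isIn kv.1 low) =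
      pvCombine (pvStepB low none x) (L.find? (fun kv => PySem.Str.isIn kv.1 low)) := by
  induction L with
  | nil =>
      cases hx : PySem.Chars.isIn x.1.toList low.toList <;>
        simp [pvInsDesc, pvStepB, pvCombine, PySem.Str.isIn, hx, List.find?]
  | cons y L ih =>
      rcases List.pairwise_cons.mp h with ⟨hy, hL⟩
      simp only [pvInsDesc]
      split_ifs with hlt
      · cases hpy : PySem.Chars.isIn y.1.toList low.toList
        · simp only [List.find?, PySem.Str.isIn, hpy]
          exact ih hL
        · have h1 : (y :: pvInsDesc x L).find? (fun kv => PySem.Str.isIn kv.1 low) = some y := by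
            simp [List.find?, PySem.Str.isIn, hpy]
          have h2 : (y :: L).find? (fun kv => PySem.Str.isIn kv.1 low) = some y := by
            simp [List.find?, PySem.Str.isIn, hpy]
          rw [h1, h2]
          cases hx : PySem.Chars.isIn x.1.toList low.toList
          · have hstep : pvStepB low none x = none := by simp [pvStepB, PySem.Str.isIn, hx]
            rw [hstep, pvCombine_none]
          · have hstep : pvStepB low none x = some x := by simp [pvStepB, PySem.Str.isIn, hx]
            rw [hstep]
            simp only [pvCombine]
            split_ifs
            rfl
      · cases hx : PySem.Chars.isIn x.1.toList low.toList
        · have hstep : pvStepB low none x = none := by simp [pvStepB, PySem.Str.isIn, hx]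
          rw [hstep, pvCombine_none]
          simp [List.find?, PySem.Str.isIn, hx]
        · have hstep : pvStepB low none x = some x := by simp [pvStepB, PySem.Str.isIn, hx]
          have h1 : (x :: y :: L).find? (fun kv => PySem.Str.isIn kv.1 low) = some x := by
            simp [List.find?, PySem.Str.isIn, hx]
          rw [hstep, h1]
          cases hfind : (y :: L).find? (fun kv => PySem.Str.isIn kv.1 low) with
          | none => rfl
          | some t =>
              have ht : t ∈ y :: L := List.mem_of_find?_eq_some hfind
              have hle : PySem.Str.len t.1 ≤ PySem.Str.len y.1 := by
                rcases List.mem_cons.mp ht with rfl | htL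
                · omega
                · exact hy t htL
              have hnlt : ¬ PySem.Str.len x.1 < PySem.Str.len t.1 := by omega
              simp only [pvCombine]
              split_ifs
              rfl

lemma pvFind?_sortDesc (low : String) (M : List (String × String)) :
    (pvSortDesc M).find? (fun kv => PySem.Str.isIn kv.1 low) = M.foldl (pvStepB low) none := by
  induction M with
  | nil => rfl
  | cons x M ih =>
      have hpw := pvSortDesc_pairwise M
      calc (pvSortDesc (x :: M)).find? (fun kv => PySem.Str.isIn kv.1 low)
          = pvCombine (pvStepB low none x) ((pvSortDesc M).find? (fun kv => PySem.Str.isIn kv.1 low)) :=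
            pvFind?_insDesc low x _ hpw
        _ = pvCombine (pvStepB low none x) (M.foldl (pvStepB low) none) := by rw [ih]
        _ = (x :: M).foldl (pvStepB low) none := by
            simp only [List.foldl_cons]; rw [pvFoldl_stepB low M (pvStepB low none x)]

-- A's sorted keyword list is exactly the key column of the stable length-descending sort of the pairs
set_option maxRecDepth 40000 in
set_option maxHeartbeats 2000000 in
lemma pvSortedKeys_eq :
    PySem.List.sorted (PySem.Dict.keys pvKeywordMap) (fun k => PySem.Str.len k) true =
      (pvSortDesc pvKMList).map Prod.fst := by decide

set_option maxRecDepth 40000 in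
set_option maxHeartbeats 2000000 in
lemma pvLookup_all : ∀ kv ∈ pvSortDesc pvKMList, PySem.Dict.get? pvKeywordMap kv.1 = some kv.2 := by
  decide

lemma pvFirstMatch_map (low : String) :
    ∀ (pairs : List (String × String)),
      (∀ kv ∈ pairs, PySem.Dict.get? pvKeywordMap kv.1 = some kv.2) →
      pvFirstMatch low (pairs.map Prod.fst) =
        (pairs.find? (fun kv => PySem.Str.isIn kv.1 low)).map Prod.snd := by
  intro pairs
  induction pairs with
  | nil => intro _; rfl
  | cons kv pairs ih =>
      intro h
      simp only [List.map_cons, pvFirstMatch, List.find?]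
      cases hkv : PySem.Chars.isIn kv.1.toList low.toList
      · simp only [PySem.Str.isIn, hkv, Bool.false_eq_true]
        exact ih (fun x hx => h x (List.mem_cons_of_mem kv hx))
      · simp [PySem.Str.isIn, hkv, h kv List.mem_cons_self]

-- B's result, rewritten through the pair-carrying fold
lemma pvAlt_eq (description : String) :
    resolve_from_description_py_alt description =
      (pvKMList.foldl (pvStepB (PySem.Str.lower description)) none).map Prod.snd := by
  have h0 : ((0 : Int), (none : Option String)) = pvG none := rfl
  simp only [resolve_from_description_py_alt, pvPairs_eq, h0]
  rw [pvFoldl_alt_g _ pvKMList pvKM_pos none, pvG_snd]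

-- ===== VERDICT (by name: the statement is the Claim_ definition above) =====
theorem resolve_from_description_py_spec : Claim_equal_resolve_from_description_py := by
  intro description _
  unfold Spec_resolve_from_description_py
  rw [pvAlt_eq]
  by_cases hd : description = ""
  · subst hd; decide
  · simp only [resolve_from_description_py, hd, if_neg, not_false_iff]
    rw [pvSortedKeys_eq, pvFirstMatch_map _ _ pvLookup_all, pvFind?_sortDesc]
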